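-- pv_equiv track=rewrite | github.com/UWPCE-PythonCert-ClassRepos/Self_Paced-Online | students/stefan_lund/Lesson_4/dict_lab.py | set1
-- ===== SOURCE A (Python) =====
-- def set1(div, n):
--     """
--     div: divisor, integer, range of divisors starting from 2, up to div + 1.
--     n: dividend, integer, range dividends starting from 0, up to n + 1.
--     returns list of (div - 2) lists of quotients where j % i == 0,
--         list[lists][1] is the divisor.
--     """
--     s = []
--     for i in range(2, div + 1):
--         ss = []
--         for j in range(n + 1):
--             if j % i == 0:
--                 ss.append(j)
--         s.append(ss)
--
--     return s
-- ===== SOURCE B (Python) =====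
-- def set1(div, n):
--     return [list(range(0, n + 1, i)) for i in range(2, div + 1)]
-- ===== Notes on version B (the rewrite author's own statement) =====
-- stated objective: faster
-- what changed: Instead of scanning every j in 0..n and testing j % i == 0 for each divisor i, B enumerates the multiples of i directly with range(0, n+1, i), building each row in O(n/i).
import Mathlib
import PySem

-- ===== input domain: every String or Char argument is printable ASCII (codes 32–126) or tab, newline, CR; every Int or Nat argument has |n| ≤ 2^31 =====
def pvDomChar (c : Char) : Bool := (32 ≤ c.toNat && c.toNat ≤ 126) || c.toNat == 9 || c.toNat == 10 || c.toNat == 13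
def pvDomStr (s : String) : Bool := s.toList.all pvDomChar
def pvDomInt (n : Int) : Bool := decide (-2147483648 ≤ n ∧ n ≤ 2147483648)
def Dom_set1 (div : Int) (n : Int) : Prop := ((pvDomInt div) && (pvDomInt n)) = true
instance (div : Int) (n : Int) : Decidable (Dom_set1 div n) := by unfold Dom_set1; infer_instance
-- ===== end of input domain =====

-- B enumerates the multiples of each i directly with range(0, n+1, i) instead of
-- testing j % i == 0 for every j in 0..n (objective: faster).

-- ===== PORT A =====
def set1 (div : Int) (n : Int) : List (List Int) :=
  (PySem.List.pyRange 2 (div + 1) 1).foldl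
    (fun s i =>
      s ++ [(PySem.List.pyRange 0 (n + 1) 1).foldl
        (fun ss j => if PySem.Int.mod j i == 0 then ss ++ [j] else ss) []])
    []

-- ===== PORT B =====
def set1_alt (div : Int) (n : Int) : List (List Int) :=
  (PySem.List.pyRange 2 (div + 1) 1).map (fun i => PySem.List.pyRange 0 (n + 1) i)

-- ===== PRECONDITION & SPEC =====
def Spec_set1 (div : Int) (n : Int) (out : List (List Int)) : Prop := out = set1_alt div n
instance (div : Int) (n : Int) (out : List (List Int)) : Decidable (Spec_set1 div n out) := by unfold Spec_set1; infer_instance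

-- ===== CLAIM (what is proved, stated in full; the proofs are below) =====
def Claim_equal_set1 : Prop := ∀ (div : Int) (n : Int), Dom_set1 div n → Spec_set1 div n (set1 div n)

-- ===== LEMMAS AND PROOFS =====

theorem pv_pairwise_lt_pyRange_pos (a b s : Int) (hs : 0 < s) :
    List.Pairwise (· < ·) (PySem.List.pyRange a b s) := by
  rw [PySem.List.pyRange_of_pos a b hs]
  refine List.pairwise_map.2 ?_
  have := List.pairwise_lt_range (n := (if a < b then ((b - a + s - 1) / s).toNat else 0))
  exact this.imp (by intro x y h; nlinarith [Int.ofNat_lt.2 h])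

theorem pv_mod_eq_zero_iff (j i : Int) (hi : 0 < i) :
    (PySem.Int.mod j i == 0) = true ↔ i ∣ j := by
  simp only [PySem.Int.mod, beq_iff_eq]
  rw [Int.fmod_eq_emod, if_pos (Or.inl (le_of_lt hi))]
  rw [add_zero]; exact ⟨Int.dvd_of_emod_eq_zero, Int.emod_eq_zero_of_dvd⟩

-- the inner scan of A (filter of 0..n by divisibility) equals range(0, n+1, i)
theorem pv_filter_eq_range (n i : Int) (hi : 0 < i) :
    (PySem.List.pyRange 0 (n + 1) 1).filter (fun j => PySem.Int.mod j i == 0)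
      = PySem.List.pyRange 0 (n + 1) i := by
  refine List.Perm.eq_of_pairwise (le := (· < ·))
    (fun a b _ _ h1 h2 => absurd h2 (lt_asymm h1)) ?_ ?_ ?_
  · exact (PySem.List.pairwise_lt_pyRange_one 0 (n + 1)).sublist List.filter_sublist
  · exact pv_pairwise_lt_pyRange_pos 0 (n + 1) i hi
  · rw [List.perm_ext_iff_of_nodup
      ((PySem.List.nodup_pyRange_one 0 (n + 1)).filter _)
      ((pv_pairwise_lt_pyRange_pos 0 (n + 1) i hi).nodup)]
    intro x
    rw [List.mem_filter, PySem.List.mem_pyRange_one,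
      PySem.List.mem_pyRange_iff_of_pos hi, pv_mod_eq_zero_iff x i hi]
    constructor
    · rintro ⟨⟨h1, h2⟩, h3⟩; exact ⟨h1, h2, by simpa using h3⟩
    · rintro ⟨h1, h2, h3⟩; exact ⟨⟨h1, h2⟩, by simpa using h3⟩

-- ===== VERDICT (by name: the statement is the Claim_ definition above) =====
theorem set1_spec : Claim_equal_set1 := by
  intro div n _
  unfold Spec_set1 set1 set1_alt
  simp only [PySem.List.foldl_append_if, PySem.List.foldl_append_singleton_eq_map,
    List.nil_append]
  apply List.map_congr_left
  intro i hi
  have h2 : (2 : Int) ≤ i := (PySem.List.mem_pyRange_one.1 hi).1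
  simpa using pv_filter_eq_range n i (by omega)
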